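-- pv_equiv track=rewrite | github.com/neqq3/ma_music_intent | custom_components/ma_music_intent/environment_analyzer.py | _map_mass_provider_capabilities
-- ===== SOURCE A (Python) =====
-- _MA_FEATURE_CAPABILITY_MAP = {
--     "search": "search",
--     "browse": "library",
--     "recommendations": "recommendations",
--     "similar_tracks": "similar_tracks",
--     "library_artists": "library",
--     "library_albums": "library",
--     "library_tracks": "library",
--     "library_playlists": "library",
--     "library_radios": "library",
-- }
--
-- def _map_mass_provider_capabilities(supported_features: set[object]) -> set[str]:
--     feature_names = {str(feature) for feature in supported_features}
--     capabilities = {cap for feature, cap in _MA_FEATURE_CAPABILITY_MAP.items() if feature in feature_names}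
--     if "recommendations" in feature_names:
--         capabilities.add("dynamic_tracks")
--     if "similar_tracks" in feature_names:
--         capabilities.add("dynamic_tracks")
--     return capabilities
-- ===== SOURCE B (Python) =====
-- # B: data-driven inversion of A's table — one scan over (capability, trigger-features)
-- # rows, emitting a capability when any of its triggers is supported; the two explicit
-- # dynamic_tracks if-branches become an ordinary row.  "library" keeps the two row
-- # positions its triggers occupy in the original feature table.
-- _CAPABILITY_TRIGGERS = [
--     ("search", ("search",)),
--     ("library", ("browse",)),
--     ("recommendations", ("recommendations",)),
--     ("similar_tracks", ("similar_tracks",)),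
--     ("library", ("library_artists", "library_albums", "library_tracks",
--                  "library_playlists", "library_radios")),
--     ("dynamic_tracks", ("recommendations", "similar_tracks")),
-- ]
--
-- def _map_mass_provider_capabilities(supported_features: set[object]) -> set[str]:
--     feature_names = {str(feature) for feature in supported_features}
--     return {cap for cap, triggers in _CAPABILITY_TRIGGERS
--             if any(t in feature_names for t in triggers)}
-- ===== Notes on version B (the rewrite author's own statement) =====
-- stated objective: simpler
-- what changed: B inverts A's feature-to-capability dict into a (capability, trigger-features) table scanned once with an any-membership test, so the two explicit dynamic_tracks if-branches disappear into an ordinary data row.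
import Mathlib
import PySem

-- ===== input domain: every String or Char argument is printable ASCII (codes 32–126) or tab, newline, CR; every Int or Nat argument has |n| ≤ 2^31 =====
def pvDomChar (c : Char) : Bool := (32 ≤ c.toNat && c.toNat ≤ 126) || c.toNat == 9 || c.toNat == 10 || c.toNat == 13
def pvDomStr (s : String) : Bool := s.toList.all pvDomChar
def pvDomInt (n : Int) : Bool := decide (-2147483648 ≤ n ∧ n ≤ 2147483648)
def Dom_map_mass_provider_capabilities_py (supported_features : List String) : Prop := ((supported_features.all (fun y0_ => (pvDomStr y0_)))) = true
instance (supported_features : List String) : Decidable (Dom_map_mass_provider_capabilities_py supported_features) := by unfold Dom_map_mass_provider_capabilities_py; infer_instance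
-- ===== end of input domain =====

-- B inverts A's feature→capability table into a (capability, trigger-features) list
-- scanned once with an any-membership test, so the two dynamic_tracks if-branches
-- become an ordinary data row (objective: simpler, data-driven).

-- ===== PORT A =====
-- _MA_FEATURE_CAPABILITY_MAP.items(), in insertion order
def pvFeatureCapMapA : List (String × String) :=
  [("search", "search"), ("browse", "library"), ("recommendations", "recommendations"),
   ("similar_tracks", "similar_tracks"), ("library_artists", "library"),
   ("library_albums", "library"), ("library_tracks", "library"),
   ("library_playlists", "library"), ("library_radios", "library")]

-- literal port of A; str(feature) is the identity on the String elements admitted here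
def map_mass_provider_capabilities_py (supported_features : List String) : List String :=
  let feature_names : PySem.Set String := PySem.Set.ofList (supported_features.map (fun feature => feature))
  let capabilities : PySem.Set String :=
    PySem.Set.ofList ((pvFeatureCapMapA.filter (fun p => PySem.Set.contains feature_names p.1)).map (fun p => p.2))
  let capabilities := if PySem.Set.contains feature_names "recommendations" then PySem.Set.add capabilities "dynamic_tracks" else capabilities
  let capabilities := if PySem.Set.contains feature_names "similar_tracks" then PySem.Set.add capabilities "dynamic_tracks" else capabilities
  capabilities

-- ===== PORT B =====
-- _CAPABILITY_TRIGGERS from Source B, in order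
def pvCapabilityTriggersB : List (String × List String) :=
  [("search", ["search"]), ("library", ["browse"]), ("recommendations", ["recommendations"]),
   ("similar_tracks", ["similar_tracks"]),
   ("library", ["library_artists", "library_albums", "library_tracks", "library_playlists", "library_radios"]),
   ("dynamic_tracks", ["recommendations", "similar_tracks"])]

-- literal port of B
def map_mass_provider_capabilities_py_alt (supported_features : List String) : List String :=
  let feature_names : PySem.Set String := PySem.Set.ofList (supported_features.map (fun feature => feature))
  PySem.Set.ofList ((pvCapabilityTriggersB.filter (fun p => p.2.any (fun t => PySem.Set.contains feature_names t))).map (fun p => p.1))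

-- ===== PRECONDITION & SPEC =====
def Spec_map_mass_provider_capabilities_py (supported_features : List String) (out : List String) : Prop := out = map_mass_provider_capabilities_py_alt supported_features
instance (supported_features : List String) (out : List String) : Decidable (Spec_map_mass_provider_capabilities_py supported_features out) := by unfold Spec_map_mass_provider_capabilities_py; infer_instance

-- ===== CLAIM (what is proved, stated in full; the proofs are below) =====
def Claim_equal_map_mass_provider_capabilities_py : Prop := ∀ (supported_features : List String), Dom_map_mass_provider_capabilities_py supported_features → Spec_map_mass_provider_capabilities_py supported_features (map_mass_provider_capabilities_py supported_features)

-- ===== LEMMAS AND PROOFS =====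
-- (both ports depend on the input only through membership of the nine table feature
-- strings in feature_names; the proof abstracts those nine booleans and decides)

-- ===== VERDICT (by name: the statement is the Claim_ definition above) =====
theorem map_mass_provider_capabilities_py_spec : Claim_equal_map_mass_provider_capabilities_py := by
  intro sf _
  unfold Spec_map_mass_provider_capabilities_py
  unfold map_mass_provider_capabilities_py map_mass_provider_capabilities_py_alt
  unfold pvFeatureCapMapA pvCapabilityTriggersB
  simp only [List.filter_cons, List.filter_nil, List.any_cons, List.any_nil, Bool.or_false]
  generalize PySem.Set.ofList (List.map (fun feature => feature) sf) = N
  generalize PySem.Set.contains N "search" = s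
  generalize PySem.Set.contains N "browse" = b
  generalize PySem.Set.contains N "recommendations" = r
  generalize PySem.Set.contains N "similar_tracks" = t
  generalize PySem.Set.contains N "library_artists" = l1
  generalize PySem.Set.contains N "library_albums" = l2
  generalize PySem.Set.contains N "library_tracks" = l3
  generalize PySem.Set.contains N "library_playlists" = l4
  generalize PySem.Set.contains N "library_radios" = l5
  clear N
  revert s b r t l1 l2 l3 l4 l5
  decide
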